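-- pv_equiv track=rewrite | github.com/jatin569/pythonProject2 | Practice 10 Oct/Oops practice/coding challege.py | get_next_highest_salary_in_same_dept
-- ===== SOURCE A (Python) =====
-- def get_next_highest_salary_in_same_dept(employee_lst, employee_name, salary, department):
--     next_highest_salary = None
--     employee_next_highest_salary = ""
--     for i in range(len(employee_lst)):
--         if employee_lst[i][0] == employee_name:
--             pass
--         if employee_lst[i][2] == department and employee_lst[i][1] > salary:
--             if next_highest_salary == None or employee_lst[i][1] < next_highest_salary:
--                 next_highest_salary = employee_lst[i][1]
--                 employee_next_highest_salary = employee_lst[i][0]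
--     return next_highest_salary, employee_next_highest_salary
-- ===== SOURCE B (Python) =====
-- def get_next_highest_salary_in_same_dept(employee_lst, employee_name, salary, department):
--     ranked = sorted((e for e in employee_lst if e[2] == department and e[1] > salary),
--                     key=lambda e: e[1])
--     if not ranked:
--         return None, ""
--     return ranked[0][1], ranked[0][0]
-- ===== Notes on version B (the rewrite author's own statement) =====
-- stated objective: alternative
-- what changed: Replaces A's single-pass running-min scan by filter-then-stable-sort by salary and taking the head; stability of sorted makes ties resolve to the first qualifying employee exactly as A's strict-less running min does.
import Mathlib
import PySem

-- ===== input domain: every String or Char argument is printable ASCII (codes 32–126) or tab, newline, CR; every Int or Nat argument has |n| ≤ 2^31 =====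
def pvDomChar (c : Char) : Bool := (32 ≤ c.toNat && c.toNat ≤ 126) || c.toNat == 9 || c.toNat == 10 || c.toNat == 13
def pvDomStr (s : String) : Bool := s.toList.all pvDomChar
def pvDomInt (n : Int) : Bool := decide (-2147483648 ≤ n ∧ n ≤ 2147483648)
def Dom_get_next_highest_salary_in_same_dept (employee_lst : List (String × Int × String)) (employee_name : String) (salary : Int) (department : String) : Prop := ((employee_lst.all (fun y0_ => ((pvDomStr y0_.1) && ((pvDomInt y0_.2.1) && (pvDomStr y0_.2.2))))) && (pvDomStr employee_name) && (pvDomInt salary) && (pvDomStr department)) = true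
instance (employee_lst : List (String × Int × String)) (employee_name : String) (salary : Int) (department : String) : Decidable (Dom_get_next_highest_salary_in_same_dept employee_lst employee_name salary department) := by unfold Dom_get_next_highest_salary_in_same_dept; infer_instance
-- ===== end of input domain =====

-- B replaces A's fused running-min scan by filter-then-stable-sort-by-salary and taking the head; alternative decomposition, same result (stability of the sort reproduces A's first-minimum tie-breaking).

-- ===== PORT A =====
def get_next_highest_salary_in_same_dept (employee_lst : List (String × Int × String)) (employee_name : String) (salary : Int) (department : String) : Option Int × String :=
  employee_lst.foldl
    (fun st e =>
      let _ := e.1 == employee_name  -- A's 'if …: pass' branch, a no-op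
      if e.2.2 == department && decide (e.2.1 > salary) then
        match st.1 with
        | none => (some e.2.1, e.1)
        | some m => if e.2.1 < m then (some e.2.1, e.1) else st
      else st)
    (none, "")

-- ===== PORT B =====
def get_next_highest_salary_in_same_dept_alt (employee_lst : List (String × Int × String)) (employee_name : String) (salary : Int) (department : String) : Option Int × String :=
  let ranked := PySem.List.sorted (employee_lst.filter (fun e => e.2.2 == department && decide (e.2.1 > salary))) (fun e => e.2.1)
  match ranked with
  | [] => (none, "")
  | r :: _ => (some r.2.1, r.1)

-- ===== PRECONDITION & SPEC =====
def Spec_get_next_highest_salary_in_same_dept (employee_lst : List (String × Int × String)) (employee_name : String) (salary : Int) (department : String) (out : Option Int × String) : Prop := out = get_next_highest_salary_in_same_dept_alt employee_lst employee_name salary department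
instance (employee_lst : List (String × Int × String)) (employee_name : String) (salary : Int) (department : String) (out : Option Int × String) : Decidable (Spec_get_next_highest_salary_in_same_dept employee_lst employee_name salary department out) := by unfold Spec_get_next_highest_salary_in_same_dept; infer_instance

-- ===== CLAIM (what is proved, stated in full; the proofs are below) =====
def Claim_equal_get_next_highest_salary_in_same_dept : Prop := ∀ (employee_lst : List (String × Int × String)) (employee_name : String) (salary : Int) (department : String), Dom_get_next_highest_salary_in_same_dept employee_lst employee_name salary department → Spec_get_next_highest_salary_in_same_dept employee_lst employee_name salary department (get_next_highest_salary_in_same_dept employee_lst employee_name salary department)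

-- ===== LEMMAS AND PROOFS =====

-- proof-only: the pair A returns, as a function of the optional best candidate triple
def pvRep (o : Option (String × Int × String)) : Option Int × String :=
  match o with
  | none => (none, "")
  | some e => (some e.2.1, e.1)

-- proof-only: the running first-strict-minimum step on triples, keyed by salary
def pvMinStep (o : Option (String × Int × String)) (e : String × Int × String) : Option (String × Int × String) :=
  match o with
  | none => some e
  | some m => if e.2.1 < m.2.1 then some e else some m

-- A's fold equals pvRep of the running first-minimum over the filtered list
lemma pv_main (department : String) (salary : Int) (employee_name : String)
    (lst : List (String × Int × String)) (o : Option (String × Int × String)) :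
    lst.foldl
      (fun st e =>
        let _ := e.1 == employee_name
        if e.2.2 == department && decide (e.2.1 > salary) then
          match st.1 with
          | none => (some e.2.1, e.1)
          | some m => if e.2.1 < m then (some e.2.1, e.1) else st
        else st)
      (pvRep o)
    = pvRep ((lst.filter (fun e => e.2.2 == department && decide (e.2.1 > salary))).foldl pvMinStep o) := by
  induction lst generalizing o with
  | nil => rfl
  | cons e t ih =>
    by_cases hp : (e.2.2 == department && decide (e.2.1 > salary)) = true
    · simp only [List.foldl_cons, List.filter_cons, hp, if_pos]
      cases o with
      | none => simpa [pvRep, pvMinStep] using ih (some e)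
      | some m =>
        by_cases hlt : e.2.1 < m.2.1
        · simpa [pvRep, pvMinStep, hlt] using ih (some e)
        · simpa [pvRep, pvMinStep, hlt] using ih (some m)
    · simp only [List.foldl_cons, List.filter_cons, hp]
      simpa [pvRep, pvMinStep, hp] using ih o

-- head of the stable insertion-sort fold equals the running first-minimum fold
lemma pv_head_insertBy (cs : List (String × Int × String)) (acc : List (String × Int × String)) :
    (cs.foldl (fun a x => PySem.List.insertBy (fun a b => decide (a.2.1 < b.2.1)) x a) acc).head?
    = cs.foldl pvMinStep acc.head? := by
  induction cs generalizing acc with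
  | nil => rfl
  | cons x t ih =>
    simp only [List.foldl_cons]
    rw [ih]
    congr 1
    cases acc with
    | nil => rfl
    | cons y ys =>
      by_cases hd : x.2.1 < y.2.1 <;>
        simp [PySem.List.insertBy, pvMinStep, hd]

-- ===== VERDICT (by name: the statement is the Claim_ definition above) =====
theorem get_next_highest_salary_in_same_dept_spec : Claim_equal_get_next_highest_salary_in_same_dept := by
  intro lst name salary dept _
  show _ = _
  unfold get_next_highest_salary_in_same_dept get_next_highest_salary_in_same_dept_alt
  rw [show ((none, "") : Option Int × String) = pvRep none from rfl, pv_main dept salary name lst none]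
  rw [PySem.List.sorted_eq_foldl_insertBy]
  rw [show (none : Option (String × Int × String)) = (([] : List (String × Int × String)).head?) from rfl,
     ← pv_head_insertBy]
  cases h : (((lst.filter (fun e => e.2.2 == dept && decide (e.2.1 > salary))).foldl
      (fun a x => PySem.List.insertBy (fun a b => decide (a.2.1 < b.2.1)) x a) [])) with
  | nil => simp [pvRep]
  | cons r t => simp [pvRep]
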